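-- pv_equiv track=rewrite | github.com/henon-chare/This_is_the_final | alert.py | get_domain_suffixes
-- ===== SOURCE A (Python) =====
-- def get_domain_suffixes(url):
--     """
--     Generates a list of domain suffixes to search for potential parent monitors.
--     e.g., 'lms.courses.bdu.edu.et' -> ['lms.courses.bdu.edu.et', 'courses.bdu.edu.et', 'bdu.edu.et', 'edu.et', 'et']
--     """
--     try:
--         # Remove protocol and path
--         domain = url.replace("https://", "").replace("http://", "").split("/")[0]
--         parts = domain.split(".")
--         suffixes = []
--         for i in range(len(parts)):
--             suffixes.append(".".join(parts[i:]))
--         return suffixes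
--     except:
--         return [url]
-- ===== SOURCE B (Python) =====
-- def get_domain_suffixes(url):
--     """
--     Generates a list of domain suffixes to search for potential parent monitors.
--     Builds each suffix from the right with a running accumulator instead of
--     re-joining a slice for every index.
--     """
--     try:
--         domain = url.replace("https://", "").replace("http://", "").split("/")[0]
--         parts = domain.split(".")
--         suffixes = []
--         acc = None
--         for part in reversed(parts):
--             acc = part if acc is None else part + "." + acc
--             suffixes.append(acc)
--         suffixes.reverse()
--         return suffixes
--     except:
--         return [url]
-- ===== Notes on version B (the rewrite author's own statement) =====
-- stated objective: alternative
-- what changed: Replaces the re-join of a slice parts[i:] for every index with a single reverse pass that threads a running suffix accumulator (one concatenation per part), reversing the collected list at the end.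
import Mathlib
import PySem

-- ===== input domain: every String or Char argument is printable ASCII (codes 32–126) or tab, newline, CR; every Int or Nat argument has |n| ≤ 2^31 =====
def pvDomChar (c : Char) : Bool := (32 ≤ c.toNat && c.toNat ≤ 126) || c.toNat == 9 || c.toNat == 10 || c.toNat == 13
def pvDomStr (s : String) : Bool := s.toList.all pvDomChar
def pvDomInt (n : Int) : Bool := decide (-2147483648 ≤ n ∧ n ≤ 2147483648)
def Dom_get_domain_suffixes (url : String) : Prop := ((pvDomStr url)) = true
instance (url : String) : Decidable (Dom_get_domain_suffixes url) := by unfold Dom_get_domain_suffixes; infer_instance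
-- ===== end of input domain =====

-- B builds each suffix from the right with a running accumulator (one concatenation per part)
-- instead of re-joining a slice for every index: a different decomposition, same return value.


-- ===== PORT A =====
-- s.split(sep) for a nonempty separator (exact: PySem.Chars.splitOn is the sep ≠ "" form)
def pvSplit (s sep : String) : List String :=
  (PySem.Chars.splitOn s.toList sep.toList).map String.ofList

-- Nothing in A's try-block can raise (replace/split are total and split("/") is never empty,
-- so the [0] never IndexErrors): the except branch is dead and A is total.
def get_domain_suffixes (url : String) : List String :=
  let domain := PySem.List.pyGetD
    (pvSplit (PySem.Str.replace (PySem.Str.replace url "https://" "") "http://" "") "/") 0 ""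
  let parts := pvSplit domain "."
  (PySem.List.pyRange 0 (parts.length : Int) 1).foldl
    (fun suffixes i => suffixes ++ [PySem.Str.join "." (PySem.List.slice parts (some i) none)]) []

-- ===== PORT B =====
-- Python's str + (exact: concatenation of code points)
def pvCat (a b : String) : String := String.ofList (a.toList ++ b.toList)

def get_domain_suffixes_alt (url : String) : List String :=
  let domain := PySem.List.pyGetD
    (pvSplit (PySem.Str.replace (PySem.Str.replace url "https://" "") "http://" "") "/") 0 ""
  let parts := pvSplit domain "."
  let st := parts.reverse.foldl
    (fun (st : List String × Option String) part =>
      let acc := match st.2 with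
        | none => part
        | some a => pvCat (pvCat part ".") a
      (st.1 ++ [acc], some acc)) ([], none)
  st.1.reverse

-- ===== PRECONDITION & SPEC =====
def Spec_get_domain_suffixes (url : String) (out : List String) : Prop := out = get_domain_suffixes_alt url
instance (url : String) (out : List String) : Decidable (Spec_get_domain_suffixes url out) := by unfold Spec_get_domain_suffixes; infer_instance

-- ===== CLAIM (what is proved, stated in full; the proofs are below) =====
def Claim_equal_get_domain_suffixes : Prop := ∀ (url : String), Dom_get_domain_suffixes url → Spec_get_domain_suffixes url (get_domain_suffixes url)

-- ===== LEMMAS AND PROOFS =====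

-- reference function: the list of dotted suffixes of `ps`
def pvSfx : List String → List String
  | [] => []
  | x :: t => PySem.Str.join "." (x :: t) :: pvSfx t

-- A's loop equals pvSfx
theorem pvA_eq_sfx (ps : List String) :
    (PySem.List.pyRange 0 (ps.length : Int) 1).foldl
      (fun suffixes i => suffixes ++ [PySem.Str.join "." (PySem.List.slice ps (some i) none)]) []
    = pvSfx ps := by
  rw [PySem.List.foldl_append_singleton_eq_map, List.nil_append,
      PySem.List.pyRange_zero_natCast, List.map_map]
  induction ps with
  | nil => rfl
  | cons x t ih =>
    simp only [List.length_cons, List.range_succ_eq_map, List.map_cons, List.map_map, pvSfx]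
    congr 1
    · simp only [Function.comp_apply, Nat.cast_zero]
      rw [PySem.List.slice_from (x :: t) (a := (0:Int)) le_rfl]
      simp
    · rw [← ih]
      apply List.map_congr_left
      intro k hk
      simp only [Function.comp_apply, Nat.succ_eq_add_one]
      rw [PySem.List.slice_from (x :: t) (a := ((k + 1 : Nat) : Int)) (Int.natCast_nonneg _),
          PySem.List.slice_from t (a := ((k : Nat) : Int)) (Int.natCast_nonneg _)]
      simp

-- the concatenation step equals join over the extended list
theorem pvCat_join (x : String) (t : List String) (ht : t ≠ []) :
    pvCat (pvCat x ".") (PySem.Str.join "." t) = PySem.Str.join "." (x :: t) := by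
  obtain ⟨y, r, rfl⟩ := List.exists_cons_of_ne_nil ht
  have h : (pvCat (pvCat x ".") (PySem.Str.join "." (y :: r))).toList
      = (PySem.Str.join "." (x :: y :: r)).toList := by
    simp [pvCat, PySem.Str.join, PySem.Chars.join_cons_cons]
  calc pvCat (pvCat x ".") (PySem.Str.join "." (y :: r))
      = String.ofList (pvCat (pvCat x ".") (PySem.Str.join "." (y :: r))).toList :=
        String.ofList_toList.symm
    _ = _ := by rw [h, String.ofList_toList]
-- B's fold invariant
theorem pvB_fold (ps : List String) :
    ps.reverse.foldl
      (fun (st : List String × Option String) part =>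
        let acc := match st.2 with
          | none => part
          | some a => pvCat (pvCat part ".") a
        (st.1 ++ [acc], some acc)) ([], none)
    = ((pvSfx ps).reverse,
       match ps with | [] => none | _ :: _ => some (PySem.Str.join "." ps)) := by
  induction ps with
  | nil => rfl
  | cons x t ih =>
    rw [List.reverse_cons, List.foldl_append, ih]
    cases t with
    | nil => simp [pvSfx, PySem.Str.join, PySem.Chars.join_singleton]
    | cons y r =>
      simp only [List.foldl_cons, List.foldl_nil, pvSfx, List.reverse_cons]
      rw [pvCat_join x (y :: r) (by simp)]

-- ===== VERDICT (by name: the statement is the Claim_ definition above) =====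
theorem get_domain_suffixes_spec : Claim_equal_get_domain_suffixes := by
  intro url _
  simp only [Spec_get_domain_suffixes, get_domain_suffixes, get_domain_suffixes_alt,
    pvA_eq_sfx, pvB_fold, List.reverse_reverse]
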